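-- pv_equiv track=rewrite | github.com/vgraeber/adventofcode | 2023/day07/part1.py | grouphandsbytype
-- ===== SOURCE A (Python) =====
-- def grouphandsbytype(sortedinputlist):
--   types = ["five", "four", "full", "three", "two", "one", "high"]
--   betterinputlist = []
--   for type in types:
--     typegroup = []
--     for hand in sortedinputlist:
--       if (hand[1] == type):
--         typegroup.append(hand)
--     if (typegroup != []):
--       betterinputlist.append(typegroup)
--   handsonly = []
--   for type in betterinputlist:
--     typegroup = []
--     for hand in type:
--       typegroup.append(hand[0])
--     handsonly.append(typegroup)
--   return betterinputlist, handsonly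
-- ===== SOURCE B (Python) =====
-- def grouphandsbytype(sortedinputlist):
--   types = ["five", "four", "full", "three", "two", "one", "high"]
--   buckets = {}
--   for hand in sortedinputlist:
--     buckets[hand[1]] = buckets.get(hand[1], []) + [hand]
--   betterinputlist = []
--   handsonly = []
--   for type in types:
--     group = buckets.get(type, [])
--     if group:
--       betterinputlist.append(group)
--       handsonly.append([h[0] for h in group])
--   return betterinputlist, handsonly
-- ===== Notes on version B (the rewrite author's own statement) =====
-- stated objective: alternative
-- what changed: B makes one grouping pass building a dict of buckets keyed by hand type and then a single fixed-order emission loop that builds both outputs at once, instead of A's seven full scans of the input plus a second pass over the grouped result.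
import Mathlib
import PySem

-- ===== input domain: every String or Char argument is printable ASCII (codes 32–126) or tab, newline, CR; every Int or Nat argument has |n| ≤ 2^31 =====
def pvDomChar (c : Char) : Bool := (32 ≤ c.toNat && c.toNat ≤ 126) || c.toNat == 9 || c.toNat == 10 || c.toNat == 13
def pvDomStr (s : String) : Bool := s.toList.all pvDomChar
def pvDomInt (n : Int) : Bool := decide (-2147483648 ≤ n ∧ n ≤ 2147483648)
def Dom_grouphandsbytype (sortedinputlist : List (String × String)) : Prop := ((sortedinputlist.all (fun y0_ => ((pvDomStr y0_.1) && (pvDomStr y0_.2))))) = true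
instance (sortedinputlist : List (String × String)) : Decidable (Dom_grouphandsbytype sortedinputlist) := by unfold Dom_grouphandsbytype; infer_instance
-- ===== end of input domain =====

-- B replaces A's seven full scans of the input by one dict-grouping pass plus a single
-- fixed-order emission loop that builds both outputs at once.

-- ===== PORT A =====
def grouphandsbytype (sortedinputlist : List (String × String)) : (List (List (String × String))) × List (List String) :=
  let types : List String := ["five", "four", "full", "three", "two", "one", "high"]
  let betterinputlist :=
    types.foldl (fun betterinputlist type =>
      let typegroup :=
        sortedinputlist.foldl (fun typegroup hand =>
          if hand.2 == type then typegroup ++ [hand] else typegroup) []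
      if typegroup ≠ [] then betterinputlist ++ [typegroup] else betterinputlist) []
  let handsonly :=
    betterinputlist.foldl (fun handsonly type =>
      let typegroup := type.foldl (fun typegroup hand => typegroup ++ [hand.1]) []
      handsonly ++ [typegroup]) []
  (betterinputlist, handsonly)

-- ===== PORT B =====
def grouphandsbytype_alt (sortedinputlist : List (String × String)) : (List (List (String × String))) × List (List String) :=
  let types : List String := ["five", "four", "full", "three", "two", "one", "high"]
  let buckets :=
    sortedinputlist.foldl (fun buckets hand =>
      buckets.modify hand.2 [] (fun g => g ++ [hand]))
      (PySem.Dict.empty : PySem.Dict String (List (String × String)))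
  let res :=
    types.foldl (fun (acc : (List (List (String × String))) × List (List String)) type =>
      let group := buckets.getD type []
      if group ≠ [] then (acc.1 ++ [group], acc.2 ++ [group.map (·.1)]) else acc)
      ([], [])
  res

-- ===== PRECONDITION & SPEC =====
def Spec_grouphandsbytype (sortedinputlist : List (String × String)) (out : (List (List (String × String))) × List (List String)) : Prop := out = grouphandsbytype_alt sortedinputlist
instance (sortedinputlist : List (String × String)) (out : (List (List (String × String))) × List (List String)) : Decidable (Spec_grouphandsbytype sortedinputlist out) := by unfold Spec_grouphandsbytype; infer_instance

-- ===== CLAIM (what is proved, stated in full; the proofs are below) =====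
def Claim_equal_grouphandsbytype : Prop := ∀ (sortedinputlist : List (String × String)), Dom_grouphandsbytype sortedinputlist → Spec_grouphandsbytype sortedinputlist (grouphandsbytype sortedinputlist)

-- ===== LEMMAS AND PROOFS =====

-- The grouping dict's bucket for key t is exactly the scan-filter A computes for t.
theorem getD_group_foldl (l : List (String × String))
    (d : PySem.Dict String (List (String × String))) (t : String) :
    (l.foldl (fun d h => d.modify h.2 [] (fun g => g ++ [h])) d).getD t []
      = d.getD t [] ++ l.filter (fun h => h.2 == t) := by
  induction l generalizing d with
  | nil => simp
  | cons h tl ih =>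
    simp only [List.foldl_cons, List.filter_cons, ih]
    by_cases ht : h.2 = t
    · subst ht
      rw [PySem.Dict.getD_modify_self]
      simp
    · rw [PySem.Dict.getD_modify_of_ne _ _ _ (fun e => ht e.symm)]
      simp [ht]

-- A fold that appends both the group and its first components keeps the second
-- accumulator equal to the map of the first.
theorem emit_pair (types : List String) (F : String → List (String × String))
    (acc : List (List (String × String))) :
    types.foldl (fun (acc : (List (List (String × String))) × List (List String)) t =>
        if F t ≠ [] then (acc.1 ++ [F t], acc.2 ++ [(F t).map (·.1)]) else acc)
      (acc, acc.map (fun g => g.map (·.1)))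
    = (types.foldl (fun ys t => if F t ≠ [] then ys ++ [F t] else ys) acc,
       (types.foldl (fun ys t => if F t ≠ [] then ys ++ [F t] else ys) acc).map
         (fun g => g.map (·.1))) := by
  induction types generalizing acc with
  | nil => simp
  | cons t tl ih =>
    simp only [List.foldl_cons]
    by_cases hF : F t = []
    · rw [if_neg (fun hn => hn hF), if_neg (fun hn => hn hF)]
      exact ih acc
    · rw [if_pos hF, if_pos hF]
      have h2 := ih (acc ++ [F t])
      simpa [List.map_append] using h2

theorem grouphandsbytype_spec : Claim_equal_grouphandsbytype := by
  intro l _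
  unfold Spec_grouphandsbytype grouphandsbytype grouphandsbytype_alt
  simp only [PySem.List.foldl_append_if_eq_filter,
    PySem.List.foldl_append_singleton_eq_map, getD_group_foldl,
    PySem.Dict.getD_empty, List.nil_append]
  have h := emit_pair ["five", "four", "full", "three", "two", "one", "high"]
      (fun t => l.filter (fun h => h.2 == t)) []
  simp only [List.map_nil] at h
  rw [h]
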